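-- pv_equiv track=rewrite | github.com/genebenchartifact-dot/GeneBench-Artifact | tool/inject_bugs_into_transformation.py | inject_bugs_by_common_keywords
-- ===== SOURCE A (Python) =====
-- def apply_bug_by_keyword(line: str, keyword: str) -> tuple[str, bool]:
--     original = line
--     line = line.strip()
--
--     if keyword == "return" and line.startswith("return "):
--         return "return not " + line[len("return "):], True
--
--     if keyword == "if" and line.startswith("if "):
--         return "if not " + line[len("if "):], True
--
--     return original, False
--
-- def inject_bugs_by_common_keywords(code1: str, code2: str):
--     keywords = {"return", "if"}
--
--     lines1 = code1.strip().split('\n')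
--     lines2 = code2.strip().split('\n')
--
--     def find_bug_opportunities(lines):
--         keyword_lines = {kw: [] for kw in keywords}
--         for idx, line in enumerate(lines):
--             stripped = line.strip()
--             if stripped.startswith("return "):
--                 keyword_lines["return"].append(idx)
--             if stripped.startswith("if "):
--                 keyword_lines["if"].append(idx)
--         return keyword_lines
--
--     kw_lines1 = find_bug_opportunities(lines1)
--     kw_lines2 = find_bug_opportunities(lines2)
--
--     # Determine common keywords
--     common_keywords = {kw for kw in keywords if kw_lines1[kw] and kw_lines2[kw]}
--
--     # Cap bug count per keyword to minimum opportunities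
--     bug_limits = {kw: min(len(kw_lines1[kw]), len(kw_lines2[kw])) for kw in common_keywords}
--
--     def apply(lines, kw_lines, bug_limits):
--         new_lines = lines.copy()
--         bug_records = []
--         for keyword, indices in kw_lines.items():
--             count = 0
--             for idx in indices:
--                 if count >= bug_limits.get(keyword, 0):
--                     break
--                 buggy_line, is_buggy = apply_bug_by_keyword(lines[idx], keyword)
--                 if is_buggy:
--                     indent = len(lines[idx]) - len(lines[idx].lstrip())
--                     modified_line = " " * indent + buggy_line
--                     new_lines[idx] = modified_line
--                     bug_records.append((idx + 1, lines[idx], modified_line))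
--                     count += 1
--         return "\n".join(new_lines), bug_records
--
--     code1_mod, bugs1 = apply(lines1, kw_lines1, bug_limits)
--     code2_mod, bugs2 = apply(lines2, kw_lines2, bug_limits)
--
--     return (code1_mod, bugs1), (code2_mod, bugs2)
-- ===== SOURCE B (Python) =====
-- def inject_bugs_by_common_keywords(code1: str, code2: str):
--     # Negate the first `cap` "return "/"if " lines of each code, where cap is the
--     # minimum number of such lines across the two codes, keyword by keyword.
--     keywords = ["if", "return"]
--
--     lines1 = code1.strip().split('\n')
--     lines2 = code2.strip().split('\n')
--
--     def count_matches(lines, kw):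
--         n = 0
--         for line in lines:
--             if line.strip().startswith(kw + " "):
--                 n += 1
--         return n
--
--     caps = {kw: min(count_matches(lines1, kw), count_matches(lines2, kw))
--             for kw in keywords}
--
--     def transform(lines):
--         new_lines = list(lines)
--         records = []
--         for kw in keywords:
--             cap = caps[kw]
--             done = 0
--             for idx, line in enumerate(lines):
--                 if done >= cap:
--                     break
--                 stripped = line.strip()
--                 if stripped.startswith(kw + " "):
--                     indent = len(line) - len(line.lstrip())
--                     modified = " " * indent + kw + " not " + stripped[len(kw) + 1:]
--                     new_lines[idx] = modified
--                     records.append((idx + 1, line, modified))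
--                     done += 1
--         return "\n".join(new_lines), records
--
--     return transform(lines1), transform(lines2)
-- ===== Notes on version B (the rewrite author's own statement) =====
-- stated objective: simpler
-- what changed: B drops A's precomputed per-keyword index-list dict entirely: it counts matching lines per keyword, caps at the minimum of the two codes' counts, and negates the first cap matching lines in a single direct rescan of each code, instead of building index lists, intersecting them into common_keywords/bug_limits dicts and replaying the stored indices with lines[idx] lookups.
import Mathlib
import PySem

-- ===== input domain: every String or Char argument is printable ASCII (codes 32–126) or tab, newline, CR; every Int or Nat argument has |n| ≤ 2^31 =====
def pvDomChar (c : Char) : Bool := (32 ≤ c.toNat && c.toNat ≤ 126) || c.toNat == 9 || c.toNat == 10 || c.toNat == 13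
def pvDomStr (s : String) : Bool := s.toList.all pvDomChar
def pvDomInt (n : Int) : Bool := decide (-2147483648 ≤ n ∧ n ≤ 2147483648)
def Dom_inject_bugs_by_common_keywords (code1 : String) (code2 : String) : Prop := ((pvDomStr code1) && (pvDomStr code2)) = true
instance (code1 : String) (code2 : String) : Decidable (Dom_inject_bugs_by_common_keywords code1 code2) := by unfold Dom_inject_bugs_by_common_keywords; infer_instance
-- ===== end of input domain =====

-- B drops A's precomputed per-keyword index lists: it counts matching lines, caps at the minimum,
-- and negates the first cap matches in a direct rescan — simpler, same values (exact under
-- CPython's PYTHONHASHSEED=0 set order "if","return", which both ports fix).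

-- ===== PORT A =====
def apply_bug_by_keyword (line : String) (keyword : String) : String × Bool :=
  let original := line
  let line := PySem.Str.strip line
  if keyword == "return" && PySem.Str.startswith line "return " then
    ("return not " ++ PySem.Str.slice line (some 7) none, true)   -- len("return ") = 7
  else if keyword == "if" && PySem.Str.startswith line "if " then
    ("if not " ++ PySem.Str.slice line (some 3) none, true)       -- len("if ") = 3
  else (original, false)

-- find_bug_opportunities: the dict {kw: [] for kw in {"return","if"}} has the two statically
-- known keys; ported by hand as a pair (ifIdxs, returnIdxs). CPython iterates the set
-- {"return","if"} (and hence this dict) as "if","return" under PYTHONHASHSEED=0; the port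
-- fixes that order throughout (exact under that seed).
def find_bug_opportunities_loop : List String → Nat → List Nat × List Nat → List Nat × List Nat
  | [], _, acc => acc
  | line :: rest, idx, (ifIdxs, retIdxs) =>
    let stripped := PySem.Str.strip line
    let retIdxs := if PySem.Str.startswith stripped "return " then retIdxs ++ [idx] else retIdxs
    let ifIdxs := if PySem.Str.startswith stripped "if " then ifIdxs ++ [idx] else ifIdxs
    find_bug_opportunities_loop rest (idx + 1) (ifIdxs, retIdxs)

def find_bug_opportunities (lines : List String) : List Nat × List Nat :=
  find_bug_opportunities_loop lines 0 ([], [])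

-- inner 'for idx in indices' loop of apply (count, break on the limit)
def apply_keyword_loop (lines : List String) (keyword : String) (limit : Nat) :
    List Nat → Nat → List String × List (Int × String × String) → List String × List (Int × String × String)
  | [], _, st => st
  | idx :: rest, count, (newLines, recs) =>
    if limit ≤ count then (newLines, recs)
    else
      let line := lines.getD idx ""   -- lines[idx]: idx comes from enumerate, always in range
      let res := apply_bug_by_keyword line keyword
      if res.2 then
        let indent := (PySem.Str.len line - PySem.Str.len (PySem.Str.lstrip line)).toNat
        let modified := String.ofList (List.replicate indent ' ') ++ res.1
        apply_keyword_loop lines keyword limit rest (count + 1)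
          (newLines.set idx modified, recs ++ [((idx : Int) + 1, line, modified)])
      else
        apply_keyword_loop lines keyword limit rest count (newLines, recs)

-- apply(lines, kw_lines, bug_limits): items() order "if","return" as above; .get(kw, 0) is the limit
def apply_bugs (lines : List String) (kwLines : List Nat × List Nat) (limIf limRet : Nat) :
    String × List (Int × String × String) :=
  let st := apply_keyword_loop lines "if" limIf kwLines.1 0 (lines, [])
  let st := apply_keyword_loop lines "return" limRet kwLines.2 0 st
  (PySem.Str.join "\n" st.1, st.2)

def inject_bugs_by_common_keywords (code1 : String) (code2 : String) : (String × (List (Int × String × String))) × (String × (List (Int × String × String))) :=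
  let lines1 := (PySem.Str.split? (PySem.Str.strip code1) "\n").getD []   -- sep ≠ "": split? is always some
  let lines2 := (PySem.Str.split? (PySem.Str.strip code2) "\n").getD []
  let kw1 := find_bug_opportunities lines1
  let kw2 := find_bug_opportunities lines2
  -- common_keywords / bug_limits / .get(kw, 0): limit = min of lengths for a common keyword, else 0
  let limIf := if !kw1.1.isEmpty && !kw2.1.isEmpty then min kw1.1.length kw2.1.length else 0
  let limRet := if !kw1.2.isEmpty && !kw2.2.isEmpty then min kw1.2.length kw2.2.length else 0
  (apply_bugs lines1 kw1 limIf limRet, apply_bugs lines2 kw2 limIf limRet)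

-- ===== PORT B =====
def pvCountMatches (lines : List String) (kw : String) : Nat :=
  lines.foldl (fun n line => if PySem.Str.startswith (PySem.Str.strip line) (kw ++ " ") then n + 1 else n) 0

-- the 'for idx, line in enumerate(lines)' rescan of transform for one keyword
def pvNegateScan (cap : Nat) (kw : String) :
    List String → Nat → Nat → List String × List (Int × String × String) → List String × List (Int × String × String)
  | [], _, _, st => st
  | line :: rest, idx, done, (newLines, recs) =>
    if cap ≤ done then (newLines, recs)
    else
      let stripped := PySem.Str.strip line
      if PySem.Str.startswith stripped (kw ++ " ") then
        let indent := (PySem.Str.len line - PySem.Str.len (PySem.Str.lstrip line)).toNat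
        let modified := String.ofList (List.replicate indent ' ') ++ kw ++ " not " ++
          PySem.Str.slice stripped (some (PySem.Str.len kw + 1)) none
        pvNegateScan cap kw rest (idx + 1) (done + 1)
          (newLines.set idx modified, recs ++ [((idx : Int) + 1, line, modified)])
      else
        pvNegateScan cap kw rest (idx + 1) done (newLines, recs)

def pvTransform (capIf capRet : Nat) (lines : List String) : String × List (Int × String × String) :=
  let st := pvNegateScan capIf "if" lines 0 0 (lines, [])
  let st := pvNegateScan capRet "return" lines 0 0 st
  (PySem.Str.join "\n" st.1, st.2)

def inject_bugs_by_common_keywords_alt (code1 : String) (code2 : String) : (String × (List (Int × String × String))) × (String × (List (Int × String × String))) :=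
  let lines1 := (PySem.Str.split? (PySem.Str.strip code1) "\n").getD []   -- sep ≠ "": split? is always some
  let lines2 := (PySem.Str.split? (PySem.Str.strip code2) "\n").getD []
  let capIf := min (pvCountMatches lines1 "if") (pvCountMatches lines2 "if")
  let capRet := min (pvCountMatches lines1 "return") (pvCountMatches lines2 "return")
  (pvTransform capIf capRet lines1, pvTransform capIf capRet lines2)

-- ===== PRECONDITION & SPEC =====
def Spec_inject_bugs_by_common_keywords (code1 : String) (code2 : String) (out : (String × (List (Int × String × String))) × (String × (List (Int × String × String)))) : Prop := out = inject_bugs_by_common_keywords_alt code1 code2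
instance (code1 : String) (code2 : String) (out : (String × (List (Int × String × String))) × (String × (List (Int × String × String)))) : Decidable (Spec_inject_bugs_by_common_keywords code1 code2 out) := by unfold Spec_inject_bugs_by_common_keywords; infer_instance

-- ===== CLAIM (what is proved, stated in full; the proofs are below) =====
def Claim_equal_inject_bugs_by_common_keywords : Prop := ∀ (code1 : String) (code2 : String), Dom_inject_bugs_by_common_keywords code1 code2 → Spec_inject_bugs_by_common_keywords code1 code2 (inject_bugs_by_common_keywords code1 code2)

-- ===== LEMMAS AND PROOFS =====

-- a stripped line matching 'kw '
def pvPred (kw : String) (line : String) : Bool :=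
  PySem.Str.startswith (PySem.Str.strip line) (kw ++ " ")

-- enumerate(lines) starting at i
def pvEnumFrom : Nat → List String → List (Nat × String)
  | _, [] => []
  | i, l :: rest => (i, l) :: pvEnumFrom (i + 1) rest

-- the modified line both programs build for a matching line (B's exact shape)
def pvMod (kw line : String) : String :=
  String.ofList (List.replicate ((PySem.Str.len line - PySem.Str.len (PySem.Str.lstrip line)).toNat) ' ') ++ kw ++ " not " ++
    PySem.Str.slice (PySem.Str.strip line) (some (PySem.Str.len kw + 1)) none

def pvStep (kw : String) (st : List String × List (Int × String × String)) (p : Nat × String) :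
    List String × List (Int × String × String) :=
  (st.1.set p.1 (pvMod kw p.2), st.2 ++ [((p.1 : Int) + 1, p.2, pvMod kw p.2)])

def pvProc (kw : String) (ps : List (Nat × String)) (st : List String × List (Int × String × String)) :
    List String × List (Int × String × String) :=
  ps.foldl (pvStep kw) st

theorem pvModA_if (line : String) (h : pvPred "if" line = true) :
    apply_bug_by_keyword line "if" =
      (("if" ++ " not ") ++ PySem.Str.slice (PySem.Str.strip line) (some (PySem.Str.len "if" + 1)) none, true) := by
  have h' : PySem.Str.startswith (PySem.Str.strip line) "if " = true := h
  unfold apply_bug_by_keyword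
  simp only [show (("if":String) == "return") = false from by decide,
    show (("if":String) == "if") = true from by decide,
    Bool.false_and, Bool.true_and, h', if_true, if_false, Bool.false_eq_true]
  rw [show (PySem.Str.len "if" + 1 : Int) = 3 from by decide,
    show ("if":String) ++ " not " = "if not " from rfl]

theorem pvModA_return (line : String) (h : pvPred "return" line = true) :
    apply_bug_by_keyword line "return" =
      (("return" ++ " not ") ++ PySem.Str.slice (PySem.Str.strip line) (some (PySem.Str.len "return" + 1)) none, true) := by
  have h' : PySem.Str.startswith (PySem.Str.strip line) "return " = true := h
  unfold apply_bug_by_keyword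
  simp only [show (("return":String) == "return") = true from by decide,
    Bool.true_and, h', if_true]
  rw [show (PySem.Str.len "return" + 1 : Int) = 7 from by decide,
    show ("return":String) ++ " not " = "return not " from rfl]

theorem pvApplyLoopA (lines : List String) (kw : String) (limit : Nat)
    (hkw : kw = "if" ∨ kw = "return") :
    ∀ (ps : List (Nat × String)) (count : Nat) (st : List String × List (Int × String × String)),
      (∀ p ∈ ps, lines.getD p.1 "" = p.2 ∧ pvPred kw p.2 = true) →
      apply_keyword_loop lines kw limit (ps.map Prod.fst) count st = pvProc kw (ps.take (limit - count)) st := by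
  intro ps
  induction ps with
  | nil => intro count st _; simp [apply_keyword_loop, pvProc]
  | cons p ps ih =>
    intro count st hmem
    obtain ⟨nl, recs⟩ := st
    have hp := hmem p (List.mem_cons_self)
    show apply_keyword_loop lines kw limit (p.1 :: ps.map Prod.fst) count (nl, recs) = _
    rw [apply_keyword_loop]
    by_cases hc : limit ≤ count
    · rw [if_pos hc, show limit - count = 0 from by omega]
      simp [pvProc]
    · rw [if_neg hc, show limit - count = (limit - (count + 1)) + 1 from by omega,
        List.take_succ_cons]
      have hmod : ∀ kw', apply_bug_by_keyword p.2 kw' =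
          (kw' ++ " not " ++ PySem.Str.slice (PySem.Str.strip p.2) (some (PySem.Str.len kw' + 1)) none, true) →
          String.ofList (List.replicate ((PySem.Str.len p.2 - PySem.Str.len (PySem.Str.lstrip p.2)).toNat) ' ') ++ (apply_bug_by_keyword p.2 kw').1 = pvMod kw' p.2 := by
        intro kw' hres; rw [hres]; simp [pvMod, String.append_assoc]
      have hres : apply_bug_by_keyword p.2 kw =
          (kw ++ " not " ++ PySem.Str.slice (PySem.Str.strip p.2) (some (PySem.Str.len kw + 1)) none, true) := by
        rcases hkw with h | h <;> subst h
        · exact pvModA_if _ hp.2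
        · exact pvModA_return _ hp.2
      simp only [hp.1, hres]
      rw [ih (count + 1) _ (fun q hq => hmem q (List.mem_cons_of_mem _ hq))]
      have hm := hmod kw hres
      rw [hres] at hm
      simp only [pvProc, List.foldl_cons, pvStep, hm]
      simp [pvMod, String.append_assoc]

theorem pvScanB (kw : String) (cap : Nat) :
    ∀ (lines : List String) (i done : Nat) (st : List String × List (Int × String × String)),
      pvNegateScan cap kw lines i done st =
        pvProc kw (((pvEnumFrom i lines).filter (fun p => pvPred kw p.2)).take (cap - done)) st := by
  intro lines
  induction lines with
  | nil => intro i done st; simp [pvNegateScan, pvEnumFrom, pvProc]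
  | cons line rest ih =>
    intro i done st
    obtain ⟨nl, recs⟩ := st
    rw [pvNegateScan, pvEnumFrom]
    by_cases hc : cap ≤ done
    · rw [if_pos hc, show cap - done = 0 from by omega]
      simp [pvProc]
    · rw [if_neg hc]
      by_cases hp : pvPred kw line = true
      · have hp' : PySem.Str.startswith (PySem.Str.strip line) (kw ++ " ") = true := hp
        simp only [List.filter_cons, hp, if_true, hp',
          show cap - done = (cap - (done + 1)) + 1 from by omega, List.take_succ_cons]
        rw [ih (i + 1) (done + 1) _]
        simp [pvProc, pvStep, pvMod]
      · have hp0 : pvPred kw line = false := by simpa using hp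
        have hp' : PySem.Str.startswith (PySem.Str.strip line) (kw ++ " ") = false := hp0
        simp only [List.filter_cons, hp0, if_false, hp', Bool.false_eq_true]
        exact ih (i + 1) done _

theorem pvFindLoop :
    ∀ (lines : List String) (i : Nat) (acc : List Nat × List Nat),
      find_bug_opportunities_loop lines i acc =
        (acc.1 ++ ((pvEnumFrom i lines).filter (fun p => pvPred "if" p.2)).map Prod.fst,
         acc.2 ++ ((pvEnumFrom i lines).filter (fun p => pvPred "return" p.2)).map Prod.fst) := by
  intro lines
  induction lines with
  | nil => intro i acc; simp [find_bug_opportunities_loop, pvEnumFrom]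
  | cons line rest ih =>
    intro i acc
    obtain ⟨fa, ra⟩ := acc
    rw [find_bug_opportunities_loop, pvEnumFrom, ih]
    have er : PySem.Str.startswith (PySem.Str.strip line) "return " = pvPred "return" line := rfl
    have ei : PySem.Str.startswith (PySem.Str.strip line) "if " = pvPred "if" line := rfl
    rw [er, ei]
    by_cases h1 : pvPred "if" line = true <;> by_cases h2 : pvPred "return" line = true <;>
      simp [h1, h2, List.append_assoc]

theorem pvMemEnumFrom :
    ∀ (lines : List String) (i : Nat) (p : Nat × String),
      p ∈ pvEnumFrom i lines → i ≤ p.1 ∧ lines.getD (p.1 - i) "" = p.2 := by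
  intro lines
  induction lines with
  | nil => intro i p hp; simp [pvEnumFrom] at hp
  | cons line rest ih =>
    intro i p hp
    rw [pvEnumFrom] at hp
    rcases List.mem_cons.1 hp with h | h
    · subst h; simp
    · obtain ⟨h1, h2⟩ := ih (i + 1) p h
      refine ⟨by omega, ?_⟩
      rw [show p.1 - i = (p.1 - (i + 1)) + 1 from by omega, List.getD_cons_succ]
      exact h2

theorem pvCountEq (lines : List String) (kw : String) :
    pvCountMatches lines kw = (lines.filter (fun l => pvPred kw l)).length := by
  have aux : ∀ (ls : List String) (n : Nat),
      ls.foldl (fun n line => if PySem.Str.startswith (PySem.Str.strip line) (kw ++ " ") then n + 1 else n) n =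
        n + (ls.filter (fun l => pvPred kw l)).length := by
    intro ls
    induction ls with
    | nil => intro n; simp
    | cons line rest ih =>
      intro n
      rw [List.foldl_cons, List.filter_cons]
      by_cases h : pvPred kw line = true
      · have h' : PySem.Str.startswith (PySem.Str.strip line) (kw ++ " ") = true := h
        simp only [h, h', if_true, List.length_cons, ih]
        omega
      · have h0 : pvPred kw line = false := by simpa using h
        have h' : PySem.Str.startswith (PySem.Str.strip line) (kw ++ " ") = false := h0
        simp only [h0, h', Bool.false_eq_true, if_false, ih]
  have haux := aux lines 0
  rw [Nat.zero_add] at haux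
  exact haux

theorem pvEnumFilterLen (kw : String) :
    ∀ (lines : List String) (i : Nat),
      ((pvEnumFrom i lines).filter (fun p => pvPred kw p.2)).length = (lines.filter (fun l => pvPred kw l)).length := by
  intro lines
  induction lines with
  | nil => intro i; simp [pvEnumFrom]
  | cons line rest ih =>
    intro i
    rw [pvEnumFrom, List.filter_cons, List.filter_cons]
    by_cases h : pvPred kw line = true
    · simp only [h, if_true, List.length_cons, ih (i + 1)]
    · have h0 : pvPred kw line = false := by simpa using h
      simp only [h0, Bool.false_eq_true, if_false, ih (i + 1)]

theorem pvApplyEqTransform (lines : List String) (limIf limRet : Nat) :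
    apply_bugs lines
      (((pvEnumFrom 0 lines).filter (fun p => pvPred "if" p.2)).map Prod.fst,
       ((pvEnumFrom 0 lines).filter (fun p => pvPred "return" p.2)).map Prod.fst) limIf limRet =
      pvTransform limIf limRet lines := by
  have hmem : ∀ (kw : String), ∀ p ∈ (pvEnumFrom 0 lines).filter (fun p => pvPred kw p.2),
      lines.getD p.1 "" = p.2 ∧ pvPred kw p.2 = true := by
    intro kw p hp
    have h1 := List.mem_filter.1 hp
    have h2 := pvMemEnumFrom lines 0 p h1.1
    exact ⟨by simpa using h2.2, by simpa using h1.2⟩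
  unfold apply_bugs pvTransform
  dsimp only
  rw [pvApplyLoopA lines "if" limIf (Or.inl rfl) _ 0 _ (hmem "if"),
    pvApplyLoopA lines "return" limRet (Or.inr rfl) _ 0 _ (hmem "return"),
    pvScanB "if" limIf lines 0 0 _, pvScanB "return" limRet lines 0 0 _]

theorem pvLenMapFst (lines : List String) (kw : String) :
    (((pvEnumFrom 0 lines).filter (fun p => pvPred kw p.2)).map Prod.fst).length = pvCountMatches lines kw := by
  rw [List.length_map, pvEnumFilterLen, pvCountEq]

theorem pvLimEq (l1 l2 : List String) (kw : String) :
    (if !(((pvEnumFrom 0 l1).filter (fun p => pvPred kw p.2)).map Prod.fst).isEmpty &&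
        !(((pvEnumFrom 0 l2).filter (fun p => pvPred kw p.2)).map Prod.fst).isEmpty then
      min (((pvEnumFrom 0 l1).filter (fun p => pvPred kw p.2)).map Prod.fst).length
          (((pvEnumFrom 0 l2).filter (fun p => pvPred kw p.2)).map Prod.fst).length
    else 0) = min (pvCountMatches l1 kw) (pvCountMatches l2 kw) := by
  have hE1 : (((pvEnumFrom 0 l1).filter (fun p => pvPred kw p.2)).map Prod.fst).isEmpty = true ↔ pvCountMatches l1 kw = 0 := by
    rw [List.isEmpty_iff_length_eq_zero, pvLenMapFst]
  have hE2 : (((pvEnumFrom 0 l2).filter (fun p => pvPred kw p.2)).map Prod.fst).isEmpty = true ↔ pvCountMatches l2 kw = 0 := by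
    rw [List.isEmpty_iff_length_eq_zero, pvLenMapFst]
  rw [pvLenMapFst l1, pvLenMapFst l2]
  by_cases h1 : pvCountMatches l1 kw = 0
  · simp [hE1.mpr h1, h1]
  · by_cases h2 : pvCountMatches l2 kw = 0
    · simp [hE2.mpr h2, h2]
    · have e1 := eq_false_of_ne_true (fun h => h1 (hE1.mp h))
      have e2 := eq_false_of_ne_true (fun h => h2 (hE2.mp h))
      simp [e1, e2]

theorem pvFindEq (l : List String) : find_bug_opportunities l =
    (((pvEnumFrom 0 l).filter (fun p => pvPred "if" p.2)).map Prod.fst,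
     ((pvEnumFrom 0 l).filter (fun p => pvPred "return" p.2)).map Prod.fst) := by
  unfold find_bug_opportunities
  rw [pvFindLoop]
  simp

-- ===== VERDICT (by name: the statement is the Claim_ definition above) =====
theorem inject_bugs_by_common_keywords_spec : Claim_equal_inject_bugs_by_common_keywords := by
  unfold Claim_equal_inject_bugs_by_common_keywords Spec_inject_bugs_by_common_keywords
  intro code1 code2 _
  unfold inject_bugs_by_common_keywords inject_bugs_by_common_keywords_alt
  generalize (PySem.Str.split? (PySem.Str.strip code1) "\n").getD [] = l1
  generalize (PySem.Str.split? (PySem.Str.strip code2) "\n").getD [] = l2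
  dsimp only
  rw [pvFindEq l1, pvFindEq l2]
  dsimp only
  rw [pvLimEq, pvLimEq, pvApplyEqTransform, pvApplyEqTransform]
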